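-- pv_equiv track=rewrite | github.com/Tellur132/Astraia | src/astraia/evaluators/circuit_fidelity.py | _normalise_truth_table
-- ===== SOURCE A (Python) =====
-- from typing import Any, Mapping
--
-- def _normalise_truth_table(table: Mapping[str, str]) -> tuple[dict[str, str], int]:
--     normalised: dict[str, str] = {}
--     num_qubits: int | None = None
--     for input_bits, output_bits in table.items():
--         key = str(input_bits).strip()
--         value = str(output_bits).strip()
--         if num_qubits is None:
--             num_qubits = len(key)
--         if len(key) != num_qubits or len(value) != num_qubits:
--             raise ValueError("All truth table entries must use consistent bitstring lengths")
--         normalised[key] = value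
--     if num_qubits is None:
--         raise ValueError("Truth table must not be empty")
--     return normalised, num_qubits
-- ===== SOURCE B (Python) =====
-- from typing import Mapping
--
--
-- def _normalise_truth_table(table: Mapping[str, str]) -> tuple[dict[str, str], int]:
--     normalised = {str(k).strip(): str(v).strip() for k, v in table.items()}
--     lengths = {len(k) for k in normalised} | {len(v) for v in normalised.values()}
--     if not normalised:
--         raise ValueError("Truth table must not be empty")
--     if len(lengths) != 1:
--         raise ValueError("All truth table entries must use consistent bitstring lengths")
--     return normalised, next(iter(lengths))
-- ===== Notes on version B (the rewrite author's own statement) =====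
-- stated objective: simpler
-- what changed: Replaces the running num_qubits scalar with per-entry early-exit checks by building the normalised dict in one comprehension, collecting the set of all key and value lengths, and validating that set once at the end.
import Mathlib
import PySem

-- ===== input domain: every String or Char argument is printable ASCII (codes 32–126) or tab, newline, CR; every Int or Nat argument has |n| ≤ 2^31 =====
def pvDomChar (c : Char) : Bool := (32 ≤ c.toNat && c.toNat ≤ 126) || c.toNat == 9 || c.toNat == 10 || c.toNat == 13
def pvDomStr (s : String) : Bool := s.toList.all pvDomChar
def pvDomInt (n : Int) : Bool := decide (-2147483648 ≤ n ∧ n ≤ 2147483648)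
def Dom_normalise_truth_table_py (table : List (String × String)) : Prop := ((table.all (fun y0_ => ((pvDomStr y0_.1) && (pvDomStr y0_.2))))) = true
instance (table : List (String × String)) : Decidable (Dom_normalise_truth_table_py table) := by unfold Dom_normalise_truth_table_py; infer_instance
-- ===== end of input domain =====

-- B is a different decomposition (dict comprehension + a collected set of lengths validated once),
-- not faster; equivalence is about the RETURN value, ports agree on every input satisfying Pre_.

-- ===== PORT A =====
-- loop of A: state = (normalised dict, num_qubits : Option Int); 'none' result = ValueError raised
def pvGoA : List (String × String) → PySem.Dict String String → Option Int →
    Option (PySem.Dict String String × Int)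
  | [], _, none => none                       -- 'Truth table must not be empty'
  | [], d, some n => some (d, n)
  | (ib, ob) :: rest, d, nq =>
      let key := PySem.Str.strip ib
      let value := PySem.Str.strip ob
      let n : Int := nq.getD (PySem.Str.len key)
      if PySem.Str.len key ≠ n ∨ PySem.Str.len value ≠ n then none   -- consistency ValueError
      else pvGoA rest (d.insert key value) (some n)

def normalise_truth_table_py (table : List (String × String)) : (List (String × String)) × Int :=
  match pvGoA table PySem.Dict.empty none with
  | some (d, n) => (d.items, n)
  | none => ([], -1)    -- unreachable under Pre_ (Python raises ValueError here)

-- ===== PORT B =====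
def normalise_truth_table_py_alt (table : List (String × String)) : (List (String × String)) × Int :=
  let normalised : PySem.Dict String String :=
    table.foldl (fun d p => d.insert (PySem.Str.strip p.1) (PySem.Str.strip p.2)) PySem.Dict.empty
  let lengths : PySem.Set Int :=
    PySem.Set.union (PySem.Set.ofList (normalised.keys.map PySem.Str.len))
      (normalised.values.map PySem.Str.len)
  if normalised.items = [] then ([], -1)                 -- 'Truth table must not be empty'
  else if PySem.Set.len lengths ≠ 1 then ([], -1)        -- consistency ValueError
  else (normalised.items, lengths.headI)                  -- next(iter(lengths)): the unique element

-- ===== PRECONDITION & SPEC =====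
-- Pre_ = exactly the inputs on which A returns: nonempty table whose stripped keys and values
-- all have the length of the first stripped key (elsewhere Python raises ValueError).
def Pre_normalise_truth_table_py (table : List (String × String)) : Prop :=
  table ≠ [] ∧ ∀ p ∈ table,
    PySem.Str.len (PySem.Str.strip p.1) = PySem.Str.len (PySem.Str.strip table.headI.1) ∧
    PySem.Str.len (PySem.Str.strip p.2) = PySem.Str.len (PySem.Str.strip table.headI.1)
instance (table : List (String × String)) : Decidable (Pre_normalise_truth_table_py table) := by
  unfold Pre_normalise_truth_table_py; infer_instance

def pvWitness_normalise_truth_table_py : (List (String × String)) := [("00", "11"), (" 01", "10 ")]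

def Spec_normalise_truth_table_py (table : List (String × String)) (out : (List (String × String)) × Int) : Prop := out = normalise_truth_table_py_alt table
instance (table : List (String × String)) (out : (List (String × String)) × Int) : Decidable (Spec_normalise_truth_table_py table out) := by unfold Spec_normalise_truth_table_py; infer_instance

-- ===== CLAIM (what is proved, stated in full; the proofs are below) =====
def Claim_equal_normalise_truth_table_py : Prop := ∀ (table : List (String × String)), Dom_normalise_truth_table_py table → Pre_normalise_truth_table_py table → Spec_normalise_truth_table_py table (normalise_truth_table_py table)

-- ===== LEMMAS AND PROOFS =====

-- A's loop, once num_qubits is fixed at n and every remaining entry is consistent, just inserts.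
theorem pvGoA_consistent (rest : List (String × String)) (n : Int) :
    ∀ d : PySem.Dict String String,
    (∀ p ∈ rest, PySem.Str.len (PySem.Str.strip p.1) = n ∧ PySem.Str.len (PySem.Str.strip p.2) = n) →
    pvGoA rest d (some n) =
      some (rest.foldl (fun d p => d.insert (PySem.Str.strip p.1) (PySem.Str.strip p.2)) d, n) := by
  induction rest with
  | nil => intro d _; rfl
  | cons p rest ih =>
      intro d h
      obtain ⟨hk, hv⟩ := h p (List.mem_cons_self)
      obtain ⟨p1, p2⟩ := p
      simp only [pvGoA, Option.getD_some] at *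
      rw [if_neg (by push Not; exact ⟨hk, hv⟩), List.foldl_cons]
      exact ih _ (fun q hq => h q (List.mem_cons_of_mem _ hq))

-- every value of the fold-built dict is some stripped output string of the table
theorem pvValues_mem (l : List (String × String)) :
    ∀ d : PySem.Dict String String, ∀ w,
    w ∈ (l.foldl (fun d p => d.insert (PySem.Str.strip p.1) (PySem.Str.strip p.2)) d).values →
    w ∈ d.values ∨ ∃ p ∈ l, w = PySem.Str.strip p.2 := by
  induction l with
  | nil => intro d w hw; exact Or.inl hw
  | cons p l ih =>
      intro d w hw
      rcases ih _ w hw with h | ⟨q, hq, rfl⟩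
      · rcases PySem.Dict.mem_values_insert _ _ _ _ h with rfl | h'
        · exact Or.inr ⟨p, List.mem_cons_self, rfl⟩
        · exact Or.inl h'
      · exact Or.inr ⟨q, List.mem_cons_of_mem _ hq, rfl⟩

-- adding elements already present leaves a set unchanged
theorem pvFoldl_add_mem {α : Type} [BEq α] [LawfulBEq α] (l : List α) :
    ∀ s : PySem.Set α, (∀ x ∈ l, x ∈ s) → l.foldl PySem.Set.add s = s := by
  induction l with
  | nil => intro s _; rfl
  | cons a l ih =>
      intro s h
      have : PySem.Set.add s a = s := by
        simp only [PySem.Set.add]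
        rw [if_pos ((PySem.Set.contains_iff s a).mpr (h a List.mem_cons_self))]
      rw [List.foldl_cons, this]
      exact ih s (fun x hx => h x (List.mem_cons_of_mem _ hx))

-- the keys of the fold-built dict are the deduped stripped input keys
theorem pvKeys_fold (l : List (String × String)) :
    (l.foldl (fun d p => d.insert (PySem.Str.strip p.1) (PySem.Str.strip p.2)) PySem.Dict.empty).keys
      = PySem.Set.ofList (l.map (fun p => PySem.Str.strip p.1)) := by
  have h := PySem.Dict.keys_foldl_insert_key (l := l) (key := fun p => PySem.Str.strip p.1)
    (f := fun _ p => PySem.Str.strip p.2) (d := PySem.Dict.empty)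
  rw [h]; rfl

-- a nonempty list of copies of a dedups to the singleton
theorem pvOfList_const {α : Type} [BEq α] [LawfulBEq α] (l : List α) (a : α)
    (hne : l ≠ []) (h : ∀ x ∈ l, x = a) : PySem.Set.ofList l = [a] := by
  cases l with
  | nil => exact absurd rfl hne
  | cons b l =>
      have hb : b = a := h b List.mem_cons_self
      subst hb
      have : PySem.Set.ofList (b :: l) = l.foldl PySem.Set.add [b] := rfl
      rw [this, pvFoldl_add_mem l [b]
        (fun x hx => by rw [h x (List.mem_cons_of_mem _ hx)]; exact List.mem_singleton.mpr rfl)]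

-- ===== VERDICT (by name: the statement is the Claim_ definition above) =====
theorem normalise_truth_table_py_spec : Claim_equal_normalise_truth_table_py := by
  intro table _ hpre
  obtain ⟨hne, hcons⟩ := hpre
  obtain ⟨⟨k0, v0⟩, rest, rfl⟩ : ∃ p rest, table = p :: rest := by
    cases table with
    | nil => exact absurd rfl hne
    | cons p rest => exact ⟨p, rest, rfl⟩
  set n : Int := PySem.Str.len (PySem.Str.strip k0) with hn
  have hhead : ((k0, v0) :: rest).headI.1 = k0 := rfl
  rw [hhead] at hcons
  have hv0 : PySem.Str.len (PySem.Str.strip v0) = n := (hcons _ List.mem_cons_self).2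
  -- A's value
  set D : PySem.Dict String String :=
    rest.foldl (fun d p => d.insert (PySem.Str.strip p.1) (PySem.Str.strip p.2))
      (PySem.Dict.empty.insert (PySem.Str.strip k0) (PySem.Str.strip v0)) with hD
  have hA : normalise_truth_table_py ((k0, v0) :: rest) = (D.items, n) := by
    unfold normalise_truth_table_py
    simp only [pvGoA, Option.getD_none]
    rw [if_neg (by push Not; exact ⟨hn.symm, hv0⟩)]
    rw [pvGoA_consistent rest n _ (fun p hp => hcons p (List.mem_cons_of_mem _ hp))]
  -- B's value: the fold is the same dict D
  have hfold : ((k0, v0) :: rest).foldl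
      (fun d p => d.insert (PySem.Str.strip p.1) (PySem.Str.strip p.2)) PySem.Dict.empty = D := rfl
  -- keys of D
  have hkeys : D.keys = PySem.Set.ofList (((k0, v0) :: rest).map (fun p => PySem.Str.strip p.1)) := by
    rw [← hfold]; exact pvKeys_fold _
  have hkeys_ne : D.keys ≠ [] := by
    rw [hkeys]
    intro hc
    have hm : PySem.Str.strip k0 ∈ PySem.Set.ofList (((k0, v0) :: rest).map (fun p => PySem.Str.strip p.1)) :=
      (PySem.Set.mem_ofList _ _).mpr (List.mem_map.mpr ⟨(k0, v0), List.mem_cons_self, rfl⟩)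
    rw [hc] at hm; exact List.not_mem_nil hm
  have hitems_ne : D.items ≠ [] := by
    intro hc
    apply hkeys_ne
    have : D.keys = D.items.map (·.1) := rfl
    rw [this, hc]; rfl
  -- all key lengths are n
  have hklen : ∀ x ∈ D.keys.map PySem.Str.len, x = n := by
    intro x hx
    obtain ⟨s, hs, rfl⟩ := List.mem_map.mp hx
    rw [hkeys] at hs
    rw [PySem.Set.mem_ofList] at hs
    obtain ⟨p, hp, rfl⟩ := List.mem_map.mp hs
    exact (hcons p hp).1
  -- all value lengths are n
  have hvlen : ∀ x ∈ D.values.map PySem.Str.len, x = n := by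
    intro x hx
    obtain ⟨s, hs, rfl⟩ := List.mem_map.mp hx
    have := pvValues_mem rest _ s hs
    rcases this with h | ⟨p, hp, rfl⟩
    · rcases PySem.Dict.mem_values_insert _ _ _ _ h with rfl | h'
      · exact hv0
      · obtain ⟨a, ha⟩ := (by simpa [PySem.Dict.values] using h' : ∃ a, (a, s) ∈ PySem.Dict.empty.items)
        simp [PySem.Dict.empty] at ha
    · exact (hcons p (List.mem_cons_of_mem _ hp)).2
  have hklen_ne : D.keys.map PySem.Str.len ≠ [] := by
    simpa using hkeys_ne
  have hlengths : PySem.Set.union (PySem.Set.ofList (D.keys.map PySem.Str.len))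
      (D.values.map PySem.Str.len) = [n] := by
    rw [pvOfList_const _ n hklen_ne hklen]
    exact pvFoldl_add_mem _ [n] (fun x hx => by rw [hvlen x hx]; exact List.mem_singleton.mpr rfl)
  have hB : normalise_truth_table_py_alt ((k0, v0) :: rest) = (D.items, n) := by
    unfold normalise_truth_table_py_alt
    simp only [hfold, hlengths]
    rw [if_neg hitems_ne, if_neg (by simp [PySem.Set.len])]
    rfl
  unfold Spec_normalise_truth_table_py
  rw [hA, hB]
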